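-- pv_equiv track=rewrite | github.com/s-archer/xc-python-scripts | generate HCL for XC LBs/create-block.py | generate_hcl_code
-- ===== SOURCE A (Python) =====
-- def generate_hcl_code(num_customers):
--     hcl_code = "locals {\n"
--     hcl_code += "    routes = [\n"
--
--     for i in range(1, num_customers + 1, 8):
--         customers = [f"customer{j}" for j in range(i, min(i + 8, num_customers + 1))]
--         customer_str = "|".join(customers)
--         hcl_code += "        {\n"
--         hcl_code += f'            regex = "^(api|rest|this)-({customer_str})\\\\.archf5\\\\.com$"\n'
--         hcl_code += "        },\n"
--
--     hcl_code += "    ]\n"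
--     hcl_code += "}\n"
--
--     return hcl_code
-- ===== SOURCE B (Python) =====
-- def generate_hcl_code(num_customers):
--     # Single streaming pass over customers with an incremental group buffer,
--     # flushed after every eighth name or at the last customer; no per-group index math or join.
--     parts = ["locals {\n", "    routes = [\n"]
--     group = ""
--     count = 0
--     for j in range(1, num_customers + 1):
--         group = f"customer{j}" if count == 0 else group + f"|customer{j}"
--         count += 1
--         if count == 8 or j == num_customers:
--             parts.append("        {\n")
--             parts.append(f'            regex = "^(api|rest|this)-({group})\\\\.archf5\\\\.com$"\n')
--             parts.append("        },\n")
--             group = ""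
--             count = 0
--     parts.append("    ]\n")
--     parts.append("}\n")
--     return "".join(parts)
-- ===== Notes on version B (the rewrite author's own statement) =====
-- stated objective: alternative
-- what changed: B replaces A's per-group outer loop (a range stepping by eight that recomputes each group's index range with min() and joins it) by a single streaming pass over the customers that grows the current group string incrementally and flushes a block after every eighth name or at the last customer, collecting the pieces in a list joined once at the end.
import Mathlib
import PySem

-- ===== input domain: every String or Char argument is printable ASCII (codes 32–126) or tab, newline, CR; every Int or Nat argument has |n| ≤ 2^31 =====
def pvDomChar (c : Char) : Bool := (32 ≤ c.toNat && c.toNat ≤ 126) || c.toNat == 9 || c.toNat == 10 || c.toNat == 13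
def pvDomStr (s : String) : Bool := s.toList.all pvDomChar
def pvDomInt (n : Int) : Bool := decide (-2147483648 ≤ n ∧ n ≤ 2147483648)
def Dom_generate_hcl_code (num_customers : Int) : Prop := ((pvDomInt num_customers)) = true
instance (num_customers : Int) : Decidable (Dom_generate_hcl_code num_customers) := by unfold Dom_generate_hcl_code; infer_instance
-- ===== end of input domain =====

-- B replaces the per-group loop (stepped range + min() + join per group) by one streaming pass
-- over the customers with an incremental group buffer flushed after every eighth name or at the
-- last customer (objective: alternative decomposition, same cost).

-- ===== PORT A =====
def generate_hcl_code (num_customers : Int) : String :=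
  let hcl0 := "locals {\n"
  let hcl1 := hcl0 ++ "    routes = [\n"
  let body := (PySem.List.pyRange 1 (num_customers + 1) 8).foldl (fun hcl i =>
      let customers := (PySem.List.pyRange i (min (i + 8) (num_customers + 1)) 1).map
        (fun j => "customer" ++ PySem.Int.toStr j)
      let customer_str := PySem.Str.join "|" customers
      ((hcl ++ "        {\n")
        ++ ("            regex = \"^(api|rest|this)-(" ++ customer_str ++ ")\\\\.archf5\\\\.com$\"\n"))
        ++ "        },\n") hcl1
  (body ++ "    ]\n") ++ "}\n"

-- ===== PORT B =====
-- loop body of Source B: state = (parts, group, count)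
def pvStepB (num_customers : Int) (st : List String × String × Int) (j : Int) :
    List String × String × Int :=
  let group' := if st.2.2 == 0 then "customer" ++ PySem.Int.toStr j
                else st.2.1 ++ ("|customer" ++ PySem.Int.toStr j)
  let count' := st.2.2 + 1
  if count' == 8 || j == num_customers then
    (st.1 ++ ["        {\n",
              "            regex = \"^(api|rest|this)-(" ++ group' ++ ")\\\\.archf5\\\\.com$\"\n",
              "        },\n"], "", 0)
  else (st.1, group', count')

def generate_hcl_code_alt (num_customers : Int) : String :=
  let fin := (PySem.List.pyRange 1 (num_customers + 1) 1).foldl (pvStepB num_customers)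
      (["locals {\n", "    routes = [\n"], "", 0)
  PySem.Str.join "" ((fin.1 ++ ["    ]\n"]) ++ ["}\n"])

-- ===== PRECONDITION & SPEC =====
def Spec_generate_hcl_code (num_customers : Int) (out : String) : Prop := out = generate_hcl_code_alt num_customers
instance (num_customers : Int) (out : String) : Decidable (Spec_generate_hcl_code num_customers out) := by unfold Spec_generate_hcl_code; infer_instance

-- ===== CLAIM (what is proved, stated in full; the proofs are below) =====
def Claim_equal_generate_hcl_code : Prop := ∀ (num_customers : Int), Dom_generate_hcl_code num_customers → Spec_generate_hcl_code num_customers (generate_hcl_code num_customers)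

-- ===== LEMMAS AND PROOFS =====

-- the group string for the group starting at a (shared shape of both programs)
def pvName (j : Int) : String := "customer" ++ PySem.Int.toStr j

def pvGrp (n a : Int) : String :=
  PySem.Str.join "|" ((PySem.List.pyRange a (min (a + 8) (n + 1)) 1).map pvName)

def pvLines (n a : Int) : List String :=
  ["        {\n",
   "            regex = \"^(api|rest|this)-(" ++ pvGrp n a ++ ")\\\\.archf5\\\\.com$\"\n",
   "        },\n"]

-- join "" distributes over cons / append
theorem pv_join_nil_cons (x : String) (xs : List String) :
    PySem.Str.join "" (x :: xs) = x ++ PySem.Str.join "" xs := by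
  cases xs with
  | nil => apply String.toList_inj.mp
           simp [PySem.Str.join, PySem.Chars.join_singleton, PySem.Chars.join_nil]
  | cons y t => apply String.toList_inj.mp
                simp [PySem.Str.join, PySem.Chars.join_cons_cons]

theorem pv_join_nil_append (xs ys : List String) :
    PySem.Str.join "" (xs ++ ys) = PySem.Str.join "" xs ++ PySem.Str.join "" ys := by
  induction xs with
  | nil => apply String.toList_inj.mp; simp [PySem.Str.join, PySem.Chars.join_nil]
  | cons x t ih => simp only [List.cons_append, pv_join_nil_cons, ih, String.append_assoc]

-- join sep over a snoc of a nonempty list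
theorem pv_join_sep_snoc (sep y x : String) (xs : List String) :
    PySem.Str.join sep ((y :: xs) ++ [x]) = (PySem.Str.join sep (y :: xs) ++ sep) ++ x := by
  induction xs generalizing y with
  | nil => apply String.toList_inj.mp
           simp [PySem.Str.join, PySem.Chars.join_cons_cons, PySem.Chars.join_singleton]
  | cons z t ih =>
      have h1 : ((y :: z :: t) ++ [x]) = y :: ((z :: t) ++ [x]) := by simp
      rw [h1]
      apply String.toList_inj.mp
      have h2 := congrArg String.toList (ih z)
      simp [PySem.Str.join, PySem.Chars.join_cons_cons] at h2 ⊢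
      simp [h2]

-- string-fold appending three pieces per step is the join of the map (A's accumulation shape)
theorem pv_foldl_append_join (l : List Int) (g1 g2 g3 : Int → String) (h : String) :
    l.foldl (fun acc i => acc ++ g1 i ++ g2 i ++ g3 i) h
      = h ++ PySem.Str.join "" (l.map (fun i => g1 i ++ g2 i ++ g3 i)) := by
  induction l generalizing h with
  | nil => apply String.toList_inj.mp; simp [PySem.Str.join, PySem.Chars.join_nil]
  | cons a t ih =>
      rw [List.foldl_cons, ih, List.map_cons, pv_join_nil_cons]
      simp [String.append_assoc]

-- pyRange with step 8: nil and cons forms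
theorem pv_pyRange8_nil {a b : Int} (h : b ≤ a) : PySem.List.pyRange a b 8 = [] := by
  rw [PySem.List.pyRange_of_pos a b (by norm_num)]
  rw [if_neg (by omega)]
  simp

theorem pv_pyRange8_cons {a b : Int} (h : a < b) :
    PySem.List.pyRange a b 8 = a :: PySem.List.pyRange (a + 8) b 8 := by
  rw [PySem.List.pyRange_of_pos a b (by norm_num),
      PySem.List.pyRange_of_pos (a + 8) b (by norm_num)]
  by_cases h2 : a + 8 < b
  · rw [if_pos h, if_pos h2]
    have hc : ((b - a + 8 - 1) / 8).toNat = ((b - (a + 8) + 8 - 1) / 8).toNat + 1 := by omega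
    rw [hc, List.range_succ_eq_map, List.map_cons, List.map_map]
    refine congrArg₂ List.cons (by ring) (List.map_congr_left ?_)
    intro k _
    simp only [Function.comp_apply]
    push_cast
    ring
  · rw [if_pos h, if_neg h2]
    have hc : ((b - a + 8 - 1) / 8).toNat = 1 := by omega
    rw [hc]
    simp

-- the incremental buffer update of B's loop body produces the joined group string
theorem pv_group_snoc (t : Nat) (a : Int) :
    (if ((t : Int) == 0) = true then "customer" ++ PySem.Int.toStr (a + t)
     else PySem.Str.join "|" ((PySem.List.pyRange a (a + t) 1).map pvName)
       ++ ("|customer" ++ PySem.Int.toStr (a + t)))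
    = PySem.Str.join "|" (((PySem.List.pyRange a (a + t) 1) ++ [a + t]).map pvName) := by
  by_cases h0 : t = 0
  · subst h0
    rw [if_pos (by norm_num)]
    rw [show a + ((0 : Nat) : Int) = a by push_cast; ring,
        PySem.List.pyRange_one_eq_nil le_rfl]
    apply (String.toList_inj.mp _).symm
    simp [PySem.Str.join, PySem.Chars.join_singleton, pvName]
  · have hf : ((t : Int) == 0) = false := by simp; omega
    rw [hf, if_neg (by simp)]
    obtain ⟨y, ys, hy⟩ : ∃ y ys, PySem.List.pyRange a (a + t) 1 = y :: ys := by
      have : a < a + t := by omega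
      exact ⟨a, _, PySem.List.pyRange_one_cons this⟩
    rw [hy, List.map_append, List.map_cons, List.map_singleton, pv_join_sep_snoc]
    apply String.toList_inj.mp
    simp [pvName, String.append_assoc]

-- a no-flush run: t names (t ≤ 7, none of them the last customer) from a fresh group buffer
theorem pv_run (n : Int) (t : Nat) : ∀ (a : Int) (out : List String),
    (t : Int) ≤ 7 → a + t ≤ n →
    (PySem.List.pyRange a (a + t) 1).foldl (pvStepB n) (out, "", 0)
      = (out, PySem.Str.join "|" ((PySem.List.pyRange a (a + t) 1).map pvName), (t : Int)) := by
  induction t with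
  | zero =>
      intro a out _ _
      rw [show a + ((0 : Nat) : Int) = a by push_cast; ring,
          PySem.List.pyRange_one_eq_nil le_rfl]
      refine congrArg (Prod.mk out) (congrArg₂ Prod.mk ?_ (by push_cast))
      apply (String.toList_inj.mp _).symm
      simp [PySem.Str.join, PySem.Chars.join_nil]
  | succ t ih =>
      intro a out ht hend
      have hsplit : PySem.List.pyRange a (a + ((t + 1 : Nat) : Int)) 1
          = PySem.List.pyRange a (a + t) 1 ++ [a + t] := by
        rw [show a + ((t + 1 : Nat) : Int) = (a + t) + 1 by push_cast; ring]
        exact PySem.List.pyRange_one_succ_right (by omega)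
      rw [hsplit, List.foldl_append]
      rw [ih a out (by push_cast at ht ⊢; omega) (by push_cast at hend ⊢; omega)]
      simp only [List.foldl_cons, List.foldl_nil]
      show pvStepB n (out, _, _) (a + t) = _
      unfold pvStepB
      have hc8 : (((t : Int) + 1) == 8) = false := by simp; push_cast at ht; omega
      have hcn : ((a + (t : Int)) == n) = false := by simp; push_cast at hend; omega
      simp only [hc8, hcn, Bool.or_self, Bool.false_eq_true, if_false]
      refine congrArg (Prod.mk out) (congrArg₂ Prod.mk ?_ (by push_cast; ring))
      exact pv_group_snoc t a

-- one full group starting at a (1 ≤ group size ≤ 8), flushed at the end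
theorem pv_group (n a : Int) (out : List String) (ha : a ≤ n) :
    (PySem.List.pyRange a (min (a + 8) (n + 1)) 1).foldl (pvStepB n) (out, "", 0)
      = (out ++ pvLines n a, "", 0) := by
  set m := min (a + 8) (n + 1) with hm
  have hs1 : a + 1 ≤ m := by omega
  have hs8 : m ≤ a + 8 := by omega
  have hsn : m ≤ n + 1 := by omega
  set t : Nat := (m - a - 1).toNat with htdef
  have htm : m = (a + t) + 1 := by omega
  have hsplit : PySem.List.pyRange a m 1 = PySem.List.pyRange a (a + t) 1 ++ [a + t] := by
    rw [htm]; exact PySem.List.pyRange_one_succ_right (by omega)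
  rw [hsplit, List.foldl_append]
  rw [pv_run n t a out (by omega) (by omega)]
  simp only [List.foldl_cons, List.foldl_nil]
  show pvStepB n (out, _, _) (a + t) = _
  unfold pvStepB
  have hflush : ((((t : Int) + 1) == 8) || ((a + (t : Int)) == n)) = true := by
    by_cases h8 : m = a + 8
    · have h : (t : Int) + 1 = 8 := by omega
      simp [h]
    · have h : a + (t : Int) = n := by omega
      simp [h]
  simp only [hflush, if_pos]
  refine congrArg₂ Prod.mk ?_ rfl
  have hgr : (if ((t : Int) == 0) = true then "customer" ++ PySem.Int.toStr (a + t)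
      else PySem.Str.join "|" ((PySem.List.pyRange a (a + t) 1).map pvName)
        ++ ("|customer" ++ PySem.Int.toStr (a + t))) = pvGrp n a := by
    unfold pvGrp
    rw [← hm, hsplit]
    exact pv_group_snoc t a
  rw [hgr]
  rfl

-- the whole streaming loop = one flushed group per step-8 range element
theorem pv_Bmain (n : Int) : ∀ (a : Int) (out : List String),
    (PySem.List.pyRange a (n + 1) 1).foldl (pvStepB n) (out, "", 0)
      = (out ++ (PySem.List.pyRange a (n + 1) 8).flatMap (pvLines n), "", 0) := by
  suffices h : ∀ (m : Nat) (a : Int) (out : List String), (n + 1 - a).toNat ≤ m →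
      (PySem.List.pyRange a (n + 1) 1).foldl (pvStepB n) (out, "", 0)
        = (out ++ (PySem.List.pyRange a (n + 1) 8).flatMap (pvLines n), "", 0) by
    exact fun a out => h (n + 1 - a).toNat a out le_rfl
  intro m
  induction m with
  | zero =>
      intro a out hle
      have ha : n + 1 ≤ a := by omega
      rw [PySem.List.pyRange_one_eq_nil ha, pv_pyRange8_nil ha]
      simp
  | succ m ih =>
      intro a out hle
      by_cases ha : n + 1 ≤ a
      · rw [PySem.List.pyRange_one_eq_nil ha, pv_pyRange8_nil ha]
        simp
      · have han : a ≤ n := by omega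
        set b := min (a + 8) (n + 1) with hb
        have hsplit : PySem.List.pyRange a (n + 1) 1
            = PySem.List.pyRange a b 1 ++ PySem.List.pyRange b (n + 1) 1 :=
          PySem.List.pyRange_one_append a b (n + 1) (by omega) (by omega)
        rw [hsplit, List.foldl_append, pv_group n a out han]
        rw [pv_pyRange8_cons (show a < n + 1 by omega), List.flatMap_cons]
        by_cases h8 : a + 8 ≤ n + 1
        · have hbeq : b = a + 8 := by omega
          rw [hbeq] at *
          rw [ih (a + 8) (out ++ pvLines n a) (by omega)]
          simp [List.append_assoc]
        · have hbeq : b = n + 1 := by omega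
          rw [hbeq] at *
          rw [PySem.List.pyRange_one_eq_nil le_rfl, pv_pyRange8_nil (by omega)]
          simp

-- A's per-group block as one string
theorem pv_Amain (n : Int) :
    generate_hcl_code n
      = ("locals {\n" ++ "    routes = [\n")
        ++ PySem.Str.join "" ((PySem.List.pyRange 1 (n + 1) 8).map
            (fun i => ("        {\n"
              ++ ("            regex = \"^(api|rest|this)-(" ++ pvGrp n i ++ ")\\\\.archf5\\\\.com$\"\n"))
              ++ "        },\n"))
        ++ ("    ]\n" ++ "}\n") := by
  simp only [generate_hcl_code]
  rw [pv_foldl_append_join]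
  simp only [String.append_assoc]
  rfl

-- join "" over the flatMap of three-string blocks = join "" over the concatenated blocks
theorem pv_join_flat (n : Int) (l : List Int) :
    PySem.Str.join "" (l.flatMap (pvLines n))
      = PySem.Str.join "" (l.map (fun i => ("        {\n"
          ++ ("            regex = \"^(api|rest|this)-(" ++ pvGrp n i ++ ")\\\\.archf5\\\\.com$\"\n"))
          ++ "        },\n")) := by
  induction l with
  | nil => simp
  | cons a t ih =>
      rw [List.flatMap_cons, List.map_cons, pv_join_nil_append, ih, pv_join_nil_cons]
      apply congrArg₂ (· ++ ·) _ rfl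
      apply String.toList_inj.mp
      simp [pvLines, PySem.Str.join, PySem.Chars.join_cons_cons, PySem.Chars.join_singleton,
        String.append_assoc]

theorem pv_main (n : Int) : generate_hcl_code n = generate_hcl_code_alt n := by
  rw [pv_Amain]
  simp only [generate_hcl_code_alt]
  rw [pv_Bmain n 1 ["locals {\n", "    routes = [\n"]]
  simp only
  rw [pv_join_nil_append, pv_join_nil_append, pv_join_nil_append, pv_join_flat]
  apply String.toList_inj.mp
  simp [PySem.Str.join, PySem.Chars.join_singleton,
    PySem.Chars.join_cons_cons, String.append_assoc]

-- ===== VERDICT (by name: the statement is the Claim_ definition above) =====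
theorem generate_hcl_code_spec : Claim_equal_generate_hcl_code := by
  intro n _
  unfold Spec_generate_hcl_code
  exact pv_main n
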